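-- pv_equiv track=rewrite | github.com/dongminlee94/leetcode-practice | src/1952_Three Divisors.py | isThree
-- ===== SOURCE A (Python) =====
-- import math
--
-- def isThree(n: int) -> bool:
--     divisors = []
--     for i in range(1, int(math.sqrt(n) + 1)):
--         if n % i == 0:
--             divisors.append(i)
--             if i * i != n:
--                 divisors.append(int(n / i))
--     return len(divisors) == 3
-- ===== SOURCE B (Python) =====
-- import math
--
-- def isThree(n: int) -> bool:
--     # perfect-square + primality test instead of divisor enumeration
--     r = math.isqrt(n)
--     if r * r != n:
--         return False
--     return r >= 2 and all(r % d != 0 for d in range(2, math.isqrt(r) + 1))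
-- ===== Notes on version B (the rewrite author's own statement) =====
-- stated objective: faster
-- what changed: Replaces enumeration of all divisor pairs up to sqrt(n) with a perfect-square check (isqrt) followed by trial-division primality of the root, so only O(n^(1/4)) candidates are scanned.
import Mathlib
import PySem

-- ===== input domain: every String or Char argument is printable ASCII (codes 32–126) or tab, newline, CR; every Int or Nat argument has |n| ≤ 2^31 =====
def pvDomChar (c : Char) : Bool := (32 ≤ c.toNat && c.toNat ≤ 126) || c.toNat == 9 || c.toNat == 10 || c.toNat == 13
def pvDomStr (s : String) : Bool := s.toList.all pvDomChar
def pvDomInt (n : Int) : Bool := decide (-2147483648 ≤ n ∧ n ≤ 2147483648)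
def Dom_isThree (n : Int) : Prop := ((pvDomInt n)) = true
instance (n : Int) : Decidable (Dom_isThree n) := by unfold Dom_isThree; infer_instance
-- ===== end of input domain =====

-- B replaces A's enumeration of all divisor pairs up to sqrt(n) with a perfect-square check
-- followed by trial-division primality of the square root (objective: faster).

-- ===== PORT A =====
-- int(math.sqrt(n) + 1) equals Nat.sqrt n.toNat + 1 exactly for 0 ≤ n ≤ 2^31 (the float sqrt
-- of such n is within 1e-5 of the exact root, so int() truncation agrees with the integer sqrt);
-- int(n / i) is PySem.Int.truncdiv (exact for |n| < 2^53).
def isThree (n : Int) : Bool :=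
  let divisors : List Int :=
    (PySem.List.pyRange 1 ((Nat.sqrt n.toNat : Int) + 1) 1).foldl
      (fun acc i =>
        if PySem.Int.mod n i == 0 then
          let acc := acc ++ [i]
          if i * i != n then acc ++ [PySem.Int.truncdiv n i] else acc
        else acc) []
  divisors.length == 3

-- ===== PORT B =====
-- math.isqrt(n) is Nat.sqrt n.toNat for 0 ≤ n (it raises on n < 0, excluded by Pre_).
def isThree_alt (n : Int) : Bool :=
  let r : Int := (Nat.sqrt n.toNat : Int)
  if r * r != n then false
  else decide (2 ≤ r) &&
    (PySem.List.pyRange 2 ((Nat.sqrt r.toNat : Int) + 1) 1).all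
      (fun d => PySem.Int.mod r d != 0)

-- ===== PRECONDITION & SPEC =====
-- Both math.sqrt (in A) and math.isqrt (in B) raise ValueError on negative n.
def Pre_isThree (n : Int) : Prop := 0 ≤ n
instance (n : Int) : Decidable (Pre_isThree n) := by unfold Pre_isThree; infer_instance
def pvWitness_isThree : Int := 9

def Spec_isThree (n : Int) (out : Bool) : Prop := out = isThree_alt n
instance (n : Int) (out : Bool) : Decidable (Spec_isThree n out) := by unfold Spec_isThree; infer_instance

-- ===== CLAIM (what is proved, stated in full; the proofs are below) =====
def Claim_equal_isThree : Prop := ∀ (n : Int), Dom_isThree n → Pre_isThree n → Spec_isThree n (isThree n)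

-- ===== LEMMAS AND PROOFS =====

-- per-candidate contribution of A's loop body to the divisor count, over Nat
def cnt (m i : Nat) : Nat := if i ∣ m then (if i * i = m then 1 else 2) else 0

-- number of divisors of m not exceeding its integer square root
def Dcard (m : Nat) : Nat := ((Finset.Icc 1 (Nat.sqrt m)).filter (· ∣ m)).card

lemma foldl_body_len (n : Int) (L : List Int) (acc : List Int) :
    (L.foldl
      (fun acc i =>
        if PySem.Int.mod n i == 0 then
          let acc := acc ++ [i]
          if i * i != n then acc ++ [PySem.Int.truncdiv n i] else acc
        else acc) acc).length
    = acc.length + (L.map (fun i =>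
        if PySem.Int.mod n i = 0 then (if i * i = n then 1 else 2) else 0)).sum := by
  induction L generalizing acc with
  | nil => simp
  | cons x xs ih =>
      simp only [List.foldl_cons, List.map_cons, List.sum_cons, ih]
      by_cases h1 : PySem.Int.mod n x = 0 <;> by_cases h2 : x * x = n <;>
        simp [h1, h2] <;> omega

lemma contrib_eq (m j : Nat) :
    (if PySem.Int.mod (m : Int) (1 + (j : Int)) = 0 then
       (if (1 + (j : Int)) * (1 + (j : Int)) = (m : Int) then 1 else 2) else 0) = cnt m (j + 1) := by
  have h1 : (1 + (j : Int)) = ((j + 1 : Nat) : Int) := by push_cast; ring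
  have h2 : (((j + 1 : Nat) : Int) * ((j + 1 : Nat) : Int) = (m : Int)) ↔ ((j + 1) * (j + 1) = m) := by
    exact_mod_cast Iff.rfl
  rw [h1]
  simp only [PySem.Int.mod_eq_zero_iff_dvd, Int.natCast_dvd_natCast, h2, cnt]

lemma lenA (n : Int) (hn : 0 ≤ n) :
    (isThree n = true) ↔
      (∑ j ∈ Finset.range (Nat.sqrt n.toNat), cnt n.toNat (j + 1)) = 3 := by
  have hcast : ((n.toNat : Int)) = n := Int.toNat_of_nonneg hn
  simp only [isThree]
  rw [foldl_body_len, PySem.List.pyRange_one]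
  have harg : (((Nat.sqrt n.toNat : Int) + 1) - 1).toNat = Nat.sqrt n.toNat := by omega
  rw [harg, List.map_map]
  have key : ∀ j ∈ List.range (Nat.sqrt n.toNat),
      ((fun i => if PySem.Int.mod n i = 0 then (if i * i = n then 1 else 2) else 0) ∘
        (fun k : Nat => (1 : Int) + (k : Int))) j = cnt n.toNat (j + 1) := by
    intro j _
    simp only [Function.comp]
    rw [← hcast]
    exact contrib_eq n.toNat j
  rw [List.map_congr_left key]
  have hbridge : ((List.range (Nat.sqrt n.toNat)).map (fun j => cnt n.toNat (j + 1))).sum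
      = ∑ j ∈ Finset.range (Nat.sqrt n.toNat), cnt n.toNat (j + 1) := rfl
  rw [hbridge]
  simp

-- only j + 1 = sqrt m can square to m among j + 1 ≤ sqrt m (and only for a perfect square m)
lemma sq_hit (m : Nat) (hm : 0 < m) :
    (∑ j ∈ Finset.range (Nat.sqrt m), (if (j + 1) * (j + 1) = m then 1 else 0))
    = if Nat.sqrt m * Nat.sqrt m = m then 1 else 0 := by
  have hz : ∀ b : Nat, (b + 1) * (b + 1) = m → b + 1 = Nat.sqrt m := by
    intro b hb
    have := congrArg Nat.sqrt hb
    rwa [Nat.sqrt_eq] at this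
  by_cases hs : Nat.sqrt m * Nat.sqrt m = m
  · have hr : 1 ≤ Nat.sqrt m := Nat.sqrt_pos.mpr hm
    rw [if_pos hs, Finset.sum_eq_single_of_mem (Nat.sqrt m - 1)
      (Finset.mem_range.mpr (by omega))]
    · rw [if_pos (by rw [Nat.sub_add_cancel hr]; exact hs)]
    · intro b hb hbne
      rw [if_neg]
      intro hsq
      have := hz b hsq
      omega
  · rw [if_neg hs]
    apply Finset.sum_eq_zero
    intro b hb
    rw [if_neg]
    intro hsq
    have := hz b hsq
    rw [← this] at hs
    exact hs hsq
lemma sum_cnt (m : Nat) (hm : 0 < m) :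
    (∑ j ∈ Finset.range (Nat.sqrt m), cnt m (j + 1))
      + (if Nat.sqrt m * Nat.sqrt m = m then 1 else 0)
    = 2 * Dcard m := by
  have hpoint : ∀ j : Nat, cnt m (j + 1) + (if (j + 1) * (j + 1) = m then 1 else 0)
      = (if (j + 1) ∣ m then 2 else 0) := by
    intro j
    by_cases hd : (j + 1) ∣ m <;> by_cases hs : (j + 1) * (j + 1) = m <;>
      simp [cnt, hd, hs]
    exact absurd (Dvd.intro _ hs) hd
  calc (∑ j ∈ Finset.range (Nat.sqrt m), cnt m (j + 1))
      + (if Nat.sqrt m * Nat.sqrt m = m then 1 else 0)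
      = ∑ j ∈ Finset.range (Nat.sqrt m),
          (cnt m (j + 1) + (if (j + 1) * (j + 1) = m then 1 else 0)) := by
        rw [Finset.sum_add_distrib, sq_hit m hm]
    _ = ∑ j ∈ Finset.range (Nat.sqrt m), (if (j + 1) ∣ m then 2 else 0) := by
        exact Finset.sum_congr rfl (fun j _ => hpoint j)
    _ = ∑ i ∈ Finset.Icc 1 (Nat.sqrt m), (if i ∣ m then 2 else 0) := by
        rw [← Finset.Ico_add_one_right_eq_Icc, Finset.sum_Ico_eq_sum_range]
        exact Finset.sum_congr (by simp) (fun j _ => by rw [Nat.add_comm])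
    _ = 2 * Dcard m := by
        rw [← Finset.sum_filter, Finset.sum_const, smul_eq_mul, Nat.mul_comm]
        rfl

lemma Dcard_eq_two_iff (m : Nat) (hm : 0 < m) (hsq : Nat.sqrt m * Nat.sqrt m = m) :
    Dcard m = 2 ↔ (Nat.sqrt m).Prime := by
  set r := Nat.sqrt m with hrdef
  have hrdvd : r ∣ m := ⟨r, hsq.symm⟩
  have hr1 : 1 ≤ r := Nat.sqrt_pos.mpr hm
  constructor
  · intro h2
    have hr2 : 2 ≤ r := by
      by_contra hlt
      have hr : r = 1 := by omega
      have hle : Dcard m ≤ (Finset.Icc 1 r).card := Finset.card_filter_le _ _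
      rw [hr, Nat.card_Icc] at hle
      omega
    have hcard : ({1, r} : Finset Nat).card = 2 := by
      rw [Finset.card_insert_of_notMem (by simp; omega), Finset.card_singleton]
    have hsub : ({1, r} : Finset Nat) ⊆ (Finset.Icc 1 r).filter (· ∣ m) := by
      intro x hx
      simp only [Finset.mem_insert, Finset.mem_singleton] at hx
      rcases hx with rfl | rfl <;>
        simp only [Finset.mem_filter, Finset.mem_Icc] <;>
        exact ⟨⟨by omega, by omega⟩, by first | exact one_dvd m | exact hrdvd⟩
    have hcard' : ((Finset.Icc 1 r).filter (· ∣ m)).card = 2 := by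
      unfold Dcard at h2; rw [← hrdef] at h2; exact h2
    have heq : ({1, r} : Finset Nat) = (Finset.Icc 1 r).filter (· ∣ m) :=
      Finset.eq_of_subset_of_card_le hsub (by rw [hcard]; exact le_of_eq hcard')
    have hq := Nat.minFac_prime (show r ≠ 1 by omega)
    have hqmem : r.minFac ∈ (Finset.Icc 1 r).filter (· ∣ m) := by
      simp only [Finset.mem_filter, Finset.mem_Icc]
      exact ⟨⟨hq.one_lt.le.trans' (by omega), Nat.minFac_le (by omega)⟩,
        (Nat.minFac_dvd r).trans hrdvd⟩
    rw [← heq] at hqmem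
    simp only [Finset.mem_insert, Finset.mem_singleton] at hqmem
    rcases hqmem with h | h
    · exact absurd h hq.ne_one
    · rw [h] at hq; exact hq
  · intro hp
    have hr2 : 2 ≤ r := hp.two_le
    have heq : (Finset.Icc 1 r).filter (· ∣ m) = {1, r} := by
      ext d
      simp only [Finset.mem_filter, Finset.mem_Icc, Finset.mem_insert, Finset.mem_singleton]
      constructor
      · rintro ⟨⟨hd1, hdr⟩, hdm⟩
        have hdsq : d ∣ r ^ 2 := by rw [pow_two, hsq]; exact hdm
        rcases (Nat.dvd_prime_pow hp).mp hdsq with ⟨k, hk, rfl⟩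
        interval_cases k
        · left; rfl
        · right; exact pow_one r
        · exfalso; rw [pow_two] at hdr; nlinarith
      · rintro (rfl | rfl)
        · exact ⟨⟨le_rfl, hr1⟩, one_dvd m⟩
        · exact ⟨⟨hr1, le_rfl⟩, hrdvd⟩
    unfold Dcard
    rw [← hrdef, heq, Finset.card_insert_of_notMem (by simp; omega), Finset.card_singleton]

lemma altB (n : Int) (hn : 0 ≤ n) :
    (isThree_alt n = true) ↔
      (Nat.sqrt n.toNat * Nat.sqrt n.toNat = n.toNat ∧ (Nat.sqrt n.toNat).Prime) := by
  have hcast : ((n.toNat : Int)) = n := Int.toNat_of_nonneg hn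
  set r := Nat.sqrt n.toNat with hrdef
  have hsq : ((r : Int) * (r : Int) = n) ↔ (r * r = n.toNat) := by
    rw [← hcast]; exact_mod_cast Iff.rfl
  simp only [isThree_alt, ← hrdef, Int.toNat_natCast]
  by_cases hs : (r : Int) * (r : Int) = n
  · rw [if_neg (by simp [hs])]
    simp only [Bool.and_eq_true, decide_eq_true_eq, List.all_eq_true]
    constructor
    · rintro ⟨h2, hall⟩
      refine ⟨hsq.mp hs, Nat.prime_def_le_sqrt.mpr ⟨by exact_mod_cast h2, ?_⟩⟩
      intro e he2 hesq hedvd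
      have hmem : ((e : Int)) ∈ PySem.List.pyRange 2 ((Nat.sqrt r : Int) + 1) 1 := by
        rw [PySem.List.mem_pyRange_one]
        have hc : (e : Int) ≤ ((Nat.sqrt r : Nat) : Int) := by exact_mod_cast hesq
        exact ⟨by exact_mod_cast he2, by omega⟩
      have := hall _ hmem
      rw [bne_iff_ne, ne_eq, PySem.Int.mod_eq_zero_iff_dvd] at this
      exact this (Int.natCast_dvd_natCast.mpr hedvd)
    · rintro ⟨_, hp⟩
      rcases Nat.prime_def_le_sqrt.mp hp with ⟨h2, hnd⟩
      refine ⟨by exact_mod_cast h2, ?_⟩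
      intro d hd
      rw [PySem.List.mem_pyRange_one] at hd
      rw [bne_iff_ne, ne_eq, PySem.Int.mod_eq_zero_iff_dvd]
      intro hdvd
      have hd0 : 0 ≤ d := by omega
      have hdn : d = ((d.toNat : Nat) : Int) := by omega
      refine hnd d.toNat (by omega) (by omega) ?_
      rw [hdn] at hdvd
      exact_mod_cast hdvd
  · rw [if_pos (by simp [hs])]
    simp only [Bool.false_eq_true, false_iff, not_and]
    intro h
    exact absurd (hsq.mpr h) hs

-- ===== VERDICT (by name: the statement is the Claim_ definition above) =====
theorem isThree_spec : Claim_equal_isThree := by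
  intro n _ hpre
  unfold Spec_isThree
  rcases eq_or_lt_of_le hpre with h0 | hpos
  · rw [← h0]; decide
  · have hm : 0 < n.toNat := by omega
    rw [Bool.eq_iff_iff, lenA n hpre, altB n hpre]
    have hsum := sum_cnt n.toNat hm
    constructor
    · intro h3
      by_cases hs : Nat.sqrt n.toNat * Nat.sqrt n.toNat = n.toNat
      · rw [if_pos hs] at hsum
        exact ⟨hs, (Dcard_eq_two_iff n.toNat hm hs).mp (by omega)⟩
      · rw [if_neg hs] at hsum
        omega
    · rintro ⟨hs, hp⟩
      have hD := (Dcard_eq_two_iff n.toNat hm hs).mpr hp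
      rw [if_pos hs] at hsum
      omega
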